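-- pv_equiv track=rewrite | github.com/Amrit-S7/working-with-indexes | functions.py | list_factors
-- ===== SOURCE A (Python) =====
-- def list_factors(num):
--     """
--     -------------------------------------------------------
--     Takes an integer greater than 0 as a parameter (num) and
--     returns a list of the factors that make up that
--     number excepting the number itself.
--     Use: factors = list_factors(num)
--     -------------------------------------------------------
--     Parameters:
--         num - number greater than 0 (int > 0)
--     Returns:
--         factors - list of factors that make up num, excluding num (int)
--     -------------------------------------------------------
--     """
--     factors = []
--     i = 1
--     for i in range(1, num, 1):
--         if (num % i) == 0:
--             factors.append(i)
--         else:
--             continue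
--     return factors
-- ===== SOURCE B (Python) =====
-- def list_factors(num):
--     if num <= 1:
--         return []
--     small = []
--     large = []
--     i = 1
--     while i * i <= num:
--         if num % i == 0:
--             small.append(i)
--             j = num // i
--             if j != i and j != num:
--                 large.append(j)
--         i += 1
--     return small + large[::-1]
-- ===== Notes on version B (the rewrite author's own statement) =====
-- stated objective: faster
-- what changed: Replaced the full scan of range(1, num) with trial division up to sqrt(num) that collects each divisor pair (i, num//i) and concatenates the large divisors in reverse.
import Mathlib
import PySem

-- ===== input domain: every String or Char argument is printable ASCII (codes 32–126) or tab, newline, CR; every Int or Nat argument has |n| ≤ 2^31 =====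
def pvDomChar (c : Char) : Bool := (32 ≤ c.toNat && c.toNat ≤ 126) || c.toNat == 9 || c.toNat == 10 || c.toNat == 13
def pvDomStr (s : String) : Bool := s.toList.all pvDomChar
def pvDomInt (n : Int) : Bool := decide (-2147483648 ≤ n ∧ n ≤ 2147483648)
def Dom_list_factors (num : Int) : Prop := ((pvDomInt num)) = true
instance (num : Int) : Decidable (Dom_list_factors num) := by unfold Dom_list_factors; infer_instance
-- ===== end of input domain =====

-- B replaces A's full scan of range(1, num) by trial division up to sqrt(num),
-- collecting each divisor pair; asymptotically faster (O(sqrt n) vs O(n)).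

-- ===== PORT A =====
def list_factors (num : Int) : List Int :=
  (PySem.List.pyRange 1 num 1).foldl
    (fun factors i => if PySem.Int.mod num i == 0 then factors ++ [i] else factors) []

-- ===== PORT B =====
-- termination helper for the while loop: while the guard holds, i ≤ num
theorem pvGuardLe {i num : Int} (h : i * i ≤ num) : i ≤ num := by
  rcases le_or_gt i 0 with h0 | h0
  · nlinarith [mul_self_nonneg i]
  · nlinarith

def listFactorsAux (num i : Int) (small large : List Int) : List Int :=
  if h : i * i ≤ num then
    if PySem.Int.mod num i == 0 then
      let j := PySem.Int.floordiv num i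
      listFactorsAux num (i + 1) (small ++ [i])
        (if j ≠ i ∧ j ≠ num then large ++ [j] else large)
    else listFactorsAux num (i + 1) small large
  else small ++ large.reverse
termination_by (num + 1 - i).toNat
decreasing_by
· have := pvGuardLe h; omega
· have := pvGuardLe h; omega

def list_factors_alt (num : Int) : List Int :=
  if num ≤ 1 then [] else listFactorsAux num 1 [] []

-- ===== PRECONDITION & SPEC =====
def Spec_list_factors (num : Int) (out : List Int) : Prop := out = list_factors_alt num
instance (num : Int) (out : List Int) : Decidable (Spec_list_factors num out) := by unfold Spec_list_factors; infer_instance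

-- ===== CLAIM (what is proved, stated in full; the proofs are below) =====
def Claim_equal_list_factors : Prop := ∀ (num : Int), Dom_list_factors num → Spec_list_factors num (list_factors num)

-- ===== LEMMAS AND PROOFS =====

-- divisor predicate used by both programs
def pvDvd (num d : Int) : Bool := PySem.Int.mod num d == 0

-- the filtered range A computes
def pvD (num a b : Int) : List Int := (PySem.List.pyRange a b 1).filter (pvDvd num)

-- the exclusive upper bound of B's loop: 1 + isqrt num
def pvR (num : Int) : Int := Int.sqrt num + 1

-- small divisors from i up, large cofactors from i up (in order of d)
def pvSm (num i : Int) : List Int := (PySem.List.pyRange i (pvR num) 1).filter (pvDvd num)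
def pvLg (num i : Int) : List Int :=
  ((PySem.List.pyRange i (pvR num) 1).filter
      (fun d => pvDvd num d && PySem.Int.floordiv num d != d && PySem.Int.floordiv num d != num)).map
    (fun d => PySem.Int.floordiv num d)

theorem pvSqrt_iff (i n : Int) (hi : 1 ≤ i) (hn : 0 ≤ n) : i * i ≤ n ↔ i ≤ Int.sqrt n := by
  unfold Int.sqrt
  have h1 : i = (i.toNat : Int) := by omega
  rw [h1]
  constructor
  · intro h
    have : i.toNat * i.toNat ≤ n.toNat := by omega
    exact_mod_cast Nat.le_sqrt.mpr (by simpa [Nat.pow_two] using this)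
  · intro h
    have h2 : i.toNat ≤ n.toNat.sqrt := by exact_mod_cast h
    have := Nat.le_sqrt.mp h2
    omega

theorem pvA_eq (num : Int) : list_factors num = pvD num 1 num := by
  unfold list_factors pvD pvDvd
  simpa using PySem.List.foldl_append_if (fun i => PySem.Int.mod num i == 0) id
    (PySem.List.pyRange 1 num 1) []

theorem pvAux_spec (num : Int) (hnum : 2 ≤ num) (i : Int) (hi : 1 ≤ i)
    (small large : List Int) :
    listFactorsAux num i small large = small ++ pvSm num i ++ (large ++ pvLg num i).reverse := by
  rw [listFactorsAux]
  by_cases h : i * i ≤ num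
  · have hlt : i < pvR num := by
      have := (pvSqrt_iff i num hi (by omega)).mp h
      unfold pvR; omega
    have hcons := PySem.List.pyRange_one_cons hlt
    rw [dif_pos h]
    by_cases hd : (PySem.Int.mod num i == 0) = true
    · rw [if_pos hd]
      have hdvd : pvDvd num i = true := hd
      show listFactorsAux num (i + 1) (small ++ [i])
          (if PySem.Int.floordiv num i ≠ i ∧ PySem.Int.floordiv num i ≠ num
           then large ++ [PySem.Int.floordiv num i] else large) = _
      by_cases hc : PySem.Int.floordiv num i ≠ i ∧ PySem.Int.floordiv num i ≠ num
      · rw [if_pos hc]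
        rw [pvAux_spec num hnum (i+1) (by omega)]
        unfold pvSm pvLg
        rw [hcons]
        have hcf : (pvDvd num i && PySem.Int.floordiv num i != i
            && PySem.Int.floordiv num i != num) = true := by
          simp [pvDvd, hd, hc.1, hc.2]
        rw [List.filter_cons, List.filter_cons, hcf, hdvd]
        simp [List.append_assoc]
      · rw [if_neg hc]
        rw [pvAux_spec num hnum (i+1) (by omega)]
        unfold pvSm pvLg
        rw [hcons]
        have hcf : (pvDvd num i && PySem.Int.floordiv num i != i
            && PySem.Int.floordiv num i != num) = false := by
          rw [not_and_or] at hc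
          rcases hc with hc | hc <;> simp [bne, not_not.mp hc]
        rw [List.filter_cons, List.filter_cons, hcf, hdvd]
        simp [List.append_assoc]
    · rw [if_neg hd]
      rw [pvAux_spec num hnum (i+1) (by omega)]
      unfold pvSm pvLg
      rw [hcons]
      have hdvd : pvDvd num i = false := by unfold pvDvd; simpa using hd
      have hcf : (pvDvd num i && PySem.Int.floordiv num i != i
          && PySem.Int.floordiv num i != num) = false := by simp [hdvd]
      rw [List.filter_cons, List.filter_cons, hcf, hdvd]
      simp
  · rw [dif_neg h]
    have hge : pvR num ≤ i := by
      by_contra hcon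
      exact h ((pvSqrt_iff i num hi (by omega)).mpr (by unfold pvR at hcon; omega))
    have hnil : PySem.List.pyRange i (pvR num) 1 = [] :=
      PySem.List.pyRange_one_eq_nil hge
    unfold pvSm pvLg
    rw [hnil]
    simp
termination_by (num + 1 - i).toNat
decreasing_by
all_goals (have := pvGuardLe h; omega)

theorem pvSplit (num : Int) (hnum : 2 ≤ num) :
    pvD num 1 num = pvSm num 1 ++ pvD num (pvR num) num := by
  unfold pvD pvSm
  have h1 : (1 : Int) ≤ pvR num := by
    have := Int.sqrt_nonneg num; unfold pvR; omega
  have h2 : pvR num ≤ num := by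
    have : Int.sqrt num < num := by
      unfold Int.sqrt
      have h3 : 2 ≤ num.toNat := by omega
      have := Nat.sqrt_lt_self (by omega : 1 < num.toNat)
      omega
    unfold pvR; omega
  rw [PySem.List.pyRange_one_append 1 (pvR num) num h1 h2, List.filter_append]

theorem pvKey (num : Int) (hnum : 2 ≤ num) (x : Int) :
    (Int.sqrt num + 1 ≤ x ∧ x < num ∧ x ∣ num) ↔
    ∃ d, (1 ≤ d ∧ d < pvR num) ∧
      (d ∣ num ∧ num / d ≠ d ∧ num / d ≠ num) ∧ x = num / d := by
  have hs0 : 0 ≤ Int.sqrt num := Int.sqrt_nonneg num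
  constructor
  · rintro ⟨hx1, hx2, hx3⟩
    have hx0 : 1 ≤ x := by omega
    have hxx : ¬ x * x ≤ num := fun hcon => by
      have := (pvSqrt_iff x num hx0 (by omega)).mp hcon; omega
    have hdx : num / x * x = num := Int.ediv_mul_cancel hx3
    set d := num / x with hdset
    have hd1 : 1 ≤ d := by nlinarith
    have hdltx : d < x := by nlinarith
    have hdd : d * d ≤ num := by nlinarith
    have hds : d ≤ Int.sqrt num := (pvSqrt_iff d num hd1 (by omega)).mp hdd
    have hnd : num / d = x := by
      rw [show num = d * x by rw [← hdx]]
      exact Int.mul_ediv_cancel_left x (by omega)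
    exact ⟨d, ⟨hd1, by unfold pvR; omega⟩,
      ⟨⟨x, hdx.symm⟩, by omega, by omega⟩, hnd.symm⟩
  · rintro ⟨d, ⟨hd1, hdr⟩, ⟨hdvd, hne1, hne2⟩, hx⟩
    have hdd : d * d ≤ num :=
      (pvSqrt_iff d num hd1 (by omega)).mpr (by unfold pvR at hdr; omega)
    have hxd : num / d * d = num := Int.ediv_mul_cancel hdvd
    rw [← hx] at hxd hne1 hne2
    have hdlex : d ≤ x := by nlinarith
    have hdltx : d < x := by omega
    have hnumlt : num < x * x := by nlinarith
    have hx1 : 1 ≤ x := by omega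
    have hxs : ¬ x ≤ Int.sqrt num := fun hcon =>
      absurd ((pvSqrt_iff x num hx1 (by omega)).mpr hcon) (by omega)
    have hxlenum : x ≤ num := by nlinarith
    exact ⟨by omega, by omega, ⟨d, hxd.symm⟩⟩

theorem pvBig_eq (num : Int) (hnum : 2 ≤ num) :
    pvD num (pvR num) num = (pvLg num 1).reverse := by
  have hs0 : 0 ≤ Int.sqrt num := Int.sqrt_nonneg num
  -- membership characterisations
  have memBig : ∀ x, x ∈ pvD num (pvR num) num ↔
      (Int.sqrt num + 1 ≤ x ∧ x < num ∧ x ∣ num) := by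
    intro x
    unfold pvD pvDvd pvR
    simp [List.mem_filter, PySem.List.mem_pyRange_one, PySem.Int.mod_eq_zero_iff_dvd]
    tauto
  have memLg : ∀ x, x ∈ pvLg num 1 ↔
      ∃ d, (1 ≤ d ∧ d < pvR num) ∧
        (d ∣ num ∧ num / d ≠ d ∧ num / d ≠ num) ∧ x = num / d := by
    intro x
    unfold pvLg pvDvd
    simp only [List.mem_map, List.mem_filter, PySem.List.mem_pyRange_one,
      Bool.and_eq_true, beq_iff_eq, bne_iff_ne]
    constructor
    · rintro ⟨d, ⟨⟨hd1, hdr⟩, ⟨hdvd, hne1⟩, hne2⟩, hfx⟩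
      rw [PySem.Int.floordiv_eq_ediv_of_pos (by omega : (0:Int) < d)] at hfx hne1 hne2
      exact ⟨d, ⟨hd1, hdr⟩,
        ⟨(PySem.Int.mod_eq_zero_iff_dvd num d).mp hdvd, hne1, hne2⟩, hfx.symm⟩
    · rintro ⟨d, ⟨hd1, hdr⟩, ⟨hdvd, hne1, hne2⟩, hfx⟩
      refine ⟨d, ⟨⟨hd1, hdr⟩, ⟨(PySem.Int.mod_eq_zero_iff_dvd num d).mpr hdvd, ?_⟩, ?_⟩, ?_⟩ <;>
        rw [PySem.Int.floordiv_eq_ediv_of_pos (by omega : (0:Int) < d)] <;> omega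
  -- cofactors of distinct small divisors are distinct and descending
  have pwLg : (pvLg num 1).Pairwise (fun a b => b < a) := by
    unfold pvLg
    rw [List.pairwise_map]
    refine List.Pairwise.imp_of_mem ?_
      (((PySem.List.pairwise_lt_pyRange_one 1 (pvR num)).filter _))
    intro a b ha hb hab
    have ha' := List.mem_filter.mp ha
    have hb' := List.mem_filter.mp hb
    have ha1 : 1 ≤ a ∧ a < pvR num := (PySem.List.mem_pyRange_one).mp ha'.1
    have hb1 : 1 ≤ b ∧ b < pvR num := (PySem.List.mem_pyRange_one).mp hb'.1
    have hadvd : a ∣ num := by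
      have h2 := ha'.2
      simp only [Bool.and_eq_true, pvDvd, beq_iff_eq] at h2
      exact (PySem.Int.mod_eq_zero_iff_dvd num a).mp h2.1.1
    have hbdvd : b ∣ num := by
      have h2 := hb'.2
      simp only [Bool.and_eq_true, pvDvd, beq_iff_eq] at h2
      exact (PySem.Int.mod_eq_zero_iff_dvd num b).mp h2.1.1
    rw [PySem.Int.floordiv_eq_ediv_of_pos (by omega : (0:Int) < a),
      PySem.Int.floordiv_eq_ediv_of_pos (by omega : (0:Int) < b)]
    have hga : num / a * a = num := Int.ediv_mul_cancel hadvd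
    have hgb : num / b * b = num := Int.ediv_mul_cancel hbdvd
    have hqb1 : 1 ≤ num / b := by nlinarith
    nlinarith
  have ndLg : (pvLg num 1).Nodup := pwLg.imp (fun h => (ne_of_lt h).symm)
  have ndBig : (pvD num (pvR num) num).Nodup :=
    (PySem.List.nodup_pyRange_one _ _).filter _
  have pwBig : (pvD num (pvR num) num).Pairwise (· < ·) :=
    (PySem.List.pairwise_lt_pyRange_one _ _).filter _
  have perm : (pvD num (pvR num) num).Perm (pvLg num 1).reverse := by
    rw [List.perm_ext_iff_of_nodup ndBig (by simpa using ndLg)]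
    intro a
    rw [memBig, List.mem_reverse, memLg]
    exact pvKey num hnum a
  exact perm.eq_of_pairwise (fun a b _ _ => le_antisymm)
    (pwBig.imp le_of_lt) ((List.pairwise_reverse.mpr pwLg).imp le_of_lt)

-- ===== VERDICT (by name: the statement is the Claim_ definition above) =====
theorem list_factors_spec : Claim_equal_list_factors := by
  intro num _
  show list_factors num = list_factors_alt num
  by_cases h : num ≤ 1
  · unfold list_factors_alt
    rw [if_pos h, pvA_eq, pvD, PySem.List.pyRange_one_eq_nil h, List.filter_nil]
  · have h2 : 2 ≤ num := by omega
    unfold list_factors_alt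
    rw [if_neg h, pvAux_spec num h2 1 le_rfl, pvA_eq, pvSplit num h2, pvBig_eq num h2]
    simp
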